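-- pv_equiv track=rewrite | github.com/vsiddharth-suki/MedChat | searchPatientNotes.py | get_patient_notes_by_name
-- ===== SOURCE A (Python) =====
-- import string
--
-- def get_patient_notes_by_name(sentence, notes):
--     sentence = ''.join(char for char in sentence if char not in string.punctuation)     # remove punctuations from sentence
--     words = sentence.split()    # create an array of words in the sentence
--     for i in range(len(words) - 1):     # iterate over the words
--         first_word = words[i]
--         second_word = words[i + 1]
--         # iterate over the dictionary
--         for key, value in notes.items():
--             # check if the pair of adjacent words (all in lowercase) in sentence form a name present as a key in dictionary
--             if [first_word.lower(), second_word.lower()] == [word.lower() for word in key[0].split()[:2]]: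
--                 return [str(value), str(key[0])]
--     return ["", ""]
-- ===== SOURCE B (Python) =====
-- import string
--
-- def get_patient_notes_by_name(sentence, notes):
--     # Build an index once: (first-two-name-words lowercased) -> result; first note wins.
--     index = {}
--     for key, value in notes.items():
--         name_words = key[0].split()
--         if len(name_words) >= 2:
--             pair = (name_words[0].lower(), name_words[1].lower())
--             if pair not in index:
--                 index[pair] = [str(value), str(key[0])]
--     cleaned = sentence.translate(str.maketrans('', '', string.punctuation))
--     words = cleaned.split()
--     for w1, w2 in zip(words, words[1:]):
--         hit = index.get((w1.lower(), w2.lower()))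
--         if hit is not None:
--             return hit
--     return ["", ""]
-- ===== Notes on version B (the rewrite author's own statement) =====
-- stated objective: alternative
-- what changed: B builds a dictionary once mapping each note-name's first two lowercased words to its result (first note wins) and then looks up each adjacent word pair of the sentence in that index, replacing A's rescan of all notes for every word pair.
-- outside the precondition, e.g. on get_patient_notes_by_name('hi', {(): 'v'}): A returns ['', ''], B raises IndexError
import Mathlib
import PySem

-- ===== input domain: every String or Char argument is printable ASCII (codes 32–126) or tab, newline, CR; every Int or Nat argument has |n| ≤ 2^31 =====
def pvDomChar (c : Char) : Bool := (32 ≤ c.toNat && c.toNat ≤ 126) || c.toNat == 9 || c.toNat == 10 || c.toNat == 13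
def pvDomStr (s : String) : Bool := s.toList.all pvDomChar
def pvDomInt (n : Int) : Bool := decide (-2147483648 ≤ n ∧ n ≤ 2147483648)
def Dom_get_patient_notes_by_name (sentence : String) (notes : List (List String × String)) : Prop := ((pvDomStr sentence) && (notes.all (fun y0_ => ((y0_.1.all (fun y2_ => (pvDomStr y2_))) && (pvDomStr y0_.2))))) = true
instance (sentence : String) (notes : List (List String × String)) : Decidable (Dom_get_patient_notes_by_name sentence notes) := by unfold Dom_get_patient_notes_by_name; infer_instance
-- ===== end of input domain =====

-- B builds a dictionary index (first-two-name-words → result) once and looks each adjacent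
-- word pair of the sentence up in it, instead of A's inner rescan of all notes per word pair.


-- string.punctuation
def pvPunct : List Char := "!\"#$%&'()*+,-./:;<=>?@[\\]^_`{|}~".toList

-- ===== PORT A =====
-- inner 'for key, value in notes.items()' loop: some r = the 'return' A takes, none = loop finished
def pvInnerA (fw sw : String) : List (List String × String) → Option (List String)
  | [] => none
  | (key, value) :: rest =>
      if [PySem.Str.lower fw, PySem.Str.lower sw]
           = ((PySem.Str.split₀ (key.headD "")).take 2).map PySem.Str.lower then
        some [value, key.headD ""]
      else pvInnerA fw sw rest

-- outer 'for i in range(len(words) - 1)' loop with early return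
def pvOuterA (words : List String) (notes : List (List String × String)) : List Nat → List String
  | [] => ["", ""]
  | i :: rest =>
      match pvInnerA (words.getD i "") (words.getD (i + 1) "") notes with
      | some r => r
      | none => pvOuterA words notes rest

def get_patient_notes_by_name (sentence : String) (notes : List (List String × String)) : List String :=
  let cleaned := String.ofList (sentence.toList.filter (fun c => !pvPunct.contains c))
  let words := PySem.Str.split₀ cleaned
  pvOuterA words notes (List.range (words.length - 1))

-- ===== PORT B =====
-- build the index: first-two-name-words (lowercased) -> [value, name]; first note wins
def pvBuildB : PySem.Dict (String × String) (List String) → List (List String × String) → PySem.Dict (String × String) (List String)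
  | idx, [] => idx
  | idx, (key, value) :: rest =>
      let nameWords := PySem.Str.split₀ (key.headD "")
      if _h : 2 ≤ nameWords.length then
        let pair := (PySem.Str.lower (nameWords.getD 0 ""), PySem.Str.lower (nameWords.getD 1 ""))
        if idx.contains pair then pvBuildB idx rest
        else pvBuildB (idx.insert pair [value, key.headD ""]) rest
      else pvBuildB idx rest

-- 'for w1, w2 in zip(words, words[1:])' lookup loop
def pvScanB (idx : PySem.Dict (String × String) (List String)) : List (String × String) → List String
  | [] => ["", ""]
  | (w1, w2) :: rest =>
      match idx.get? (PySem.Str.lower w1, PySem.Str.lower w2) with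
      | some hit => hit
      | none => pvScanB idx rest

def get_patient_notes_by_name_alt (sentence : String) (notes : List (List String × String)) : List String :=
  let idx := pvBuildB PySem.Dict.empty notes
  let cleaned := String.ofList (sentence.toList.filter (fun c => !pvPunct.contains c))
  let words := PySem.Str.split₀ cleaned
  pvScanB idx (words.zip words.tail)

-- ===== PRECONDITION & SPEC =====
-- Pre_ excludes notes containing an empty-tuple key: Python's key[0] raises IndexError on such a
-- note whenever it is reached (A raises as soon as the sentence has two words and no earlier note
-- matched; B raises while building its index even when A would still return ["", ""]).
def Pre_get_patient_notes_by_name (sentence : String) (notes : List (List String × String)) : Prop :=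
  ∀ kv ∈ notes, kv.1 ≠ []
instance (sentence : String) (notes : List (List String × String)) : Decidable (Pre_get_patient_notes_by_name sentence notes) := by unfold Pre_get_patient_notes_by_name; infer_instance
def pvWitness_get_patient_notes_by_name : String × (List (List String × String)) :=
  ("Notes for John Smith today", [(["John Smith"], "fever"), (["Ann Lee", "x"], "cough")])

def Spec_get_patient_notes_by_name (sentence : String) (notes : List (List String × String)) (out : List String) : Prop := out = get_patient_notes_by_name_alt sentence notes
instance (sentence : String) (notes : List (List String × String)) (out : List String) : Decidable (Spec_get_patient_notes_by_name sentence notes out) := by unfold Spec_get_patient_notes_by_name; infer_instance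

-- ===== CLAIM (what is proved, stated in full; the proofs are below) =====
def Claim_equal_get_patient_notes_by_name : Prop := ∀ (sentence : String) (notes : List (List String × String)), Dom_get_patient_notes_by_name sentence notes → Pre_get_patient_notes_by_name sentence notes → Spec_get_patient_notes_by_name sentence notes (get_patient_notes_by_name sentence notes)

-- ===== LEMMAS AND PROOFS =====

-- the match condition of A's inner loop, characterised
lemma pvMatch_iff (fw sw : String) (ws : List String) :
    ([PySem.Str.lower fw, PySem.Str.lower sw] = (ws.take 2).map PySem.Str.lower)
      ↔ (2 ≤ ws.length ∧ (PySem.Str.lower (ws.getD 0 ""), PySem.Str.lower (ws.getD 1 ""))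
            = (PySem.Str.lower fw, PySem.Str.lower sw)) := by
  match ws with
  | [] => simp
  | [w] => simp
  | w1 :: w2 :: rest => simp [List.take, Prod.ext_iff, eq_comm, and_comm]

-- lookup in the dict B builds from 'rest' starting at 'idx' = look in idx first, else A's inner scan
lemma pvBuild_get (rest : List (List String × String)) :
    ∀ (idx : PySem.Dict (String × String) (List String)) (fw sw : String),
    (pvBuildB idx rest).get? (PySem.Str.lower fw, PySem.Str.lower sw)
      = ((idx.get? (PySem.Str.lower fw, PySem.Str.lower sw)).elim
          (pvInnerA fw sw rest) some) := by
  induction rest with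
  | nil => intro idx fw sw; cases h : idx.get? (PySem.Str.lower fw, PySem.Str.lower sw) <;>
      simp [pvBuildB, pvInnerA, h]
  | cons kv rest ih =>
      intro idx fw sw
      obtain ⟨key, value⟩ := kv
      simp only [pvBuildB, pvInnerA]
      set lk := (PySem.Str.lower fw, PySem.Str.lower sw) with hlk
      set ws := PySem.Str.split₀ (key.headD "") with hws
      set p := (PySem.Str.lower (ws.getD 0 ""), PySem.Str.lower (ws.getD 1 "")) with hp
      by_cases hm : [PySem.Str.lower fw, PySem.Str.lower sw] = (ws.take 2).map PySem.Str.lower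
      · obtain ⟨hlen, hpair⟩ := (pvMatch_iff fw sw ws).mp hm
        rw [← hp, ← hlk] at hpair
        simp only [dif_pos hlen, if_pos hm, hpair]
        by_cases hc : idx.contains lk = true
        · have hsome : (idx.get? lk).isSome := by
            rw [← PySem.Dict.contains_eq_isSome_get?]; exact hc
          simp only [hc, if_pos]
          cases h : idx.get? lk with
          | none => rw [h] at hsome; simp at hsome
          | some v =>
              rw [hlk] at h ⊢
              rw [ih idx fw sw, h]
              simp
        · simp only [Bool.not_eq_true] at hc
          simp only [hc, Bool.false_eq_true, if_false]
          rw [hlk]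
          rw [ih (idx.insert lk [value, key.headD ""]) fw sw]
          rw [← hlk, PySem.Dict.get?_insert_self]
          have hnone : idx.get? lk = none := by
            have h2 := PySem.Dict.contains_eq_isSome_get? (d := idx) (k := lk)
            rw [hc] at h2
            cases h : idx.get? lk with
            | none => rfl
            | some v => rw [h] at h2; simp at h2
          rw [hnone]
          simp
      · simp only [if_neg hm]
        by_cases hlen : 2 ≤ ws.length
        · have hne : lk ≠ p := by
            intro h
            exact hm ((pvMatch_iff fw sw ws).mpr ⟨hlen, by rw [← hp, ← hlk, h]⟩)
          simp only [dif_pos hlen]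
          by_cases hc : idx.contains p = true
          · simp only [hc, if_pos]
            rw [hlk, ih idx fw sw]
          · simp only [Bool.not_eq_true] at hc
            simp only [hc, Bool.false_eq_true, if_false]
            rw [hlk, ih (idx.insert p [value, key.headD ""]) fw sw, ← hlk,
              PySem.Dict.get?_insert_of_ne _ _ hne]
        · simp only [dif_neg hlen]
          rw [hlk, ih idx fw sw]

-- hence A's inner scan equals the lookup in the full index
lemma pvInner_eq_get (notes : List (List String × String)) (fw sw : String) :
    pvInnerA fw sw notes
      = (pvBuildB PySem.Dict.empty notes).get? (PySem.Str.lower fw, PySem.Str.lower sw) := by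
  rw [pvBuild_get notes PySem.Dict.empty fw sw]
  simp [PySem.Dict.get?_empty]

-- shifting all indices by one drops the head word
lemma pvOuter_shift (notes : List (List String × String)) (w : String) (ws : List String)
    (l : List Nat) :
    pvOuterA (w :: ws) notes (l.map Nat.succ) = pvOuterA ws notes l := by
  induction l with
  | nil => rfl
  | cons i l ih =>
      simp only [List.map_cons, pvOuterA, List.getD_cons_succ, ih]

-- the outer index loop equals the zip scan over the full index
lemma pvOuter_eq_scan (notes : List (List String × String)) (words : List String) :
    pvOuterA words notes (List.range (words.length - 1))
      = pvScanB (pvBuildB PySem.Dict.empty notes) (words.zip words.tail) := by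
  induction words with
  | nil => simp [pvOuterA, pvScanB]
  | cons w ws ih =>
      cases ws with
      | nil => simp [pvOuterA, pvScanB]
      | cons w2 ws' =>
          have hr : List.range ((w :: w2 :: ws').length - 1)
              = 0 :: (List.range ((w2 :: ws').length - 1)).map Nat.succ := by
            simp [List.range_succ_eq_map]
          rw [hr]
          simp only [pvOuterA, List.getD_cons_zero, List.getD_cons_succ,
            pvOuter_shift, ih, pvInner_eq_get notes w w2]
          simp [pvScanB, List.zip]

-- ===== VERDICT (by name: the statement is the Claim_ definition above) =====
theorem get_patient_notes_by_name_spec : Claim_equal_get_patient_notes_by_name := by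
  intro sentence notes _ _
  unfold Spec_get_patient_notes_by_name get_patient_notes_by_name get_patient_notes_by_name_alt
  exact pvOuter_eq_scan notes _
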